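-- pv_equiv track=rewrite | github.com/Grizz4h/highspeed-pux-engine | LigageneratorV2.py | _team_points_from_results
-- ===== SOURCE A (Python) =====
-- from typing import Any, Dict, List, Tuple, Optional
--
-- def _team_points_from_results(results: List[str]) -> int:
--     pts = 0
--     for r in results:
--         if r == "W":
--             pts += 3
--         elif r == "W2":
--             pts += 2
--         elif r == "L1":
--             pts += 1
--         # "L" -> 0, "T" should not occur
--     return pts
-- ===== SOURCE B (Python) =====
-- from itertools import groupby
-- from typing import List
--
-- _POINTS = {"W": 3, "W2": 2, "L1": 1}
--
-- def _team_points_from_results(results: List[str]) -> int: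
--     # sort the codes, then score each run of equal codes at once
--     total = 0
--     for code, grp in groupby(sorted(results)):
--         total += _POINTS.get(code, 0) * sum(1 for _ in grp)
--     return total
-- ===== Notes on version B (the rewrite author's own statement) =====
-- stated objective: alternative
-- what changed: B sorts the result codes and iterates groups of equal codes (itertools.groupby), adding weight*run-length per group from a small points table, instead of A's per-element if/elif accumulation; correct because the total depends only on each code's multiplicity, which sorting preserves.
import Mathlib
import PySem

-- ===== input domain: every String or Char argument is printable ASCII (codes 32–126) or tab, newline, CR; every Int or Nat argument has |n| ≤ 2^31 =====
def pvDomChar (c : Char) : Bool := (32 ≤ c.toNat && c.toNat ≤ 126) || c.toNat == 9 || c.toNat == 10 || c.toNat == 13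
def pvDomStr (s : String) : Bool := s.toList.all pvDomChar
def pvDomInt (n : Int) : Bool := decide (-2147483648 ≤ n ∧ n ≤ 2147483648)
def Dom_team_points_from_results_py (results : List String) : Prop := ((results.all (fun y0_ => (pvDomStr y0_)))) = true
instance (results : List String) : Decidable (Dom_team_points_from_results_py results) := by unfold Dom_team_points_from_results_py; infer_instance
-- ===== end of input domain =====

-- B sorts the codes and scores each run of equal codes at once (sort + groupby) instead of A's per-element if/elif pass: an alternative decomposition, same results since the total depends only on multiplicities.

-- ===== PORT A =====
def team_points_from_results_py (results : List String) : Int :=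
  results.foldl (fun pts r =>
    if r = "W" then pts + 3
    else if r = "W2" then pts + 2
    else if r = "L1" then pts + 1
    else pts) 0

-- ===== PORT B =====
-- the module-level points table _POINTS
def pvPoints : PySem.Dict String Int := PySem.Dict.ofList [("W", 3), ("W2", 2), ("L1", 1)]

-- itertools.groupby over a list: the consecutive runs as (code, run length) pairs
def pvRuns : List String → List (String × Int)
  | [] => []
  | x :: xs =>
      (x, ((xs.takeWhile (· == x)).length : Int) + 1) :: pvRuns (xs.dropWhile (· == x))
termination_by l => l.length
decreasing_by
  exact Nat.lt_succ_of_le (List.Sublist.length_le (List.dropWhile_sublist _))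

def team_points_from_results_py_alt (results : List String) : Int :=
  (pvRuns (PySem.List.sorted results (fun x => x) false)).foldl
    (fun total p => total + pvPoints.getD p.1 0 * p.2) 0

-- ===== PRECONDITION & SPEC =====
def Spec_team_points_from_results_py (results : List String) (out : Int) : Prop := out = team_points_from_results_py_alt results
instance (results : List String) (out : Int) : Decidable (Spec_team_points_from_results_py results out) := by unfold Spec_team_points_from_results_py; infer_instance

-- ===== CLAIM (what is proved, stated in full; the proofs are below) =====
def Claim_equal_team_points_from_results_py : Prop := ∀ (results : List String), Dom_team_points_from_results_py results → Spec_team_points_from_results_py results (team_points_from_results_py results)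

-- ===== LEMMAS AND PROOFS =====

-- the per-code weight both programs realise
def pvW (r : String) : Int :=
  if r = "W" then 3 else if r = "W2" then 2 else if r = "L1" then 1 else 0

theorem pvPoints_getD_eq (r : String) : pvPoints.getD r 0 = pvW r := by
  have h : pvPoints = ((PySem.Dict.empty.insert "W" 3).insert "W2" 2).insert "L1" 1 := rfl
  rw [h]
  simp only [PySem.Dict.getD_insert, PySem.Dict.getD_empty, pvW]
  split_ifs <;> simp_all

theorem pvA_foldl_eq (l : List String) (init : Int) :
    l.foldl (fun pts r =>
      if r = "W" then pts + 3
      else if r = "W2" then pts + 2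
      else if r = "L1" then pts + 1
      else pts) init = init + (l.map pvW).sum := by
  induction l generalizing init with
  | nil => simp
  | cons x xs ih =>
    simp only [List.foldl_cons, ih, List.map_cons, List.sum_cons, pvW]
    split_ifs <;> ring

theorem pvRuns_foldl_eq (l : List String) (init : Int) :
    (pvRuns l).foldl (fun total p => total + pvPoints.getD p.1 0 * p.2) init
      = init + (l.map pvW).sum := by
  induction l using pvRuns.induct generalizing init with
  | case1 => simp [pvRuns]
  | case2 x xs ih =>
    rw [pvRuns, List.foldl_cons, ih]
    have hsplit : x :: xs = (x :: xs.takeWhile (· == x)) ++ xs.dropWhile (· == x) := by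
      simp [List.takeWhile_append_dropWhile]
    have htw : ((xs.takeWhile (· == x)).map pvW).sum
        = ((xs.takeWhile (· == x)).length : Int) * pvW x := by
      have : ∀ y ∈ xs.takeWhile (· == x), pvW y = pvW x := by
        intro y hy
        have := List.mem_takeWhile_imp hy
        simp only [beq_iff_eq] at this
        rw [this]
      calc ((xs.takeWhile (· == x)).map pvW).sum
          = ((xs.takeWhile (· == x)).map (fun _ => pvW x)).sum := by
            rw [List.map_congr_left this]
        _ = ((xs.takeWhile (· == x)).length : Int) * pvW x := by
            simp [List.map_const', mul_comm]
    conv_rhs => rw [hsplit]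
    simp only [List.map_append, List.sum_append, List.map_cons, List.sum_cons, htw,
      pvPoints_getD_eq]
    ring

theorem pv_sum_perm (l : List String) :
    ((PySem.List.sorted l (fun x => x) false).map pvW).sum = (l.map pvW).sum :=
  List.Perm.sum_eq ((PySem.List.sorted_perm l (fun x => x) false).map pvW)

-- ===== VERDICT (by name: the statement is the Claim_ definition above) =====
theorem team_points_from_results_py_spec : Claim_equal_team_points_from_results_py := by
  intro results _
  unfold Spec_team_points_from_results_py team_points_from_results_py team_points_from_results_py_alt
  rw [pvA_foldl_eq, pvRuns_foldl_eq, pv_sum_perm]
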